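-- pv_equiv track=rewrite | github.com/GeruniaSun/ITMO-algs-codeforces | ex_2_E.py | minimize_removals
-- ===== SOURCE A (Python) =====
-- def minimize_removals(n, I, arr):
--     k = (8 * I) // n
--     if k > 25: return 0
--     K = 2 ** k
--
--     freq = {}
--     for x in arr:
--         freq[x] = freq.get(x, 0) + 1
--
--     counts = [freq[x] for x in sorted(freq)]
--     m = len(counts)
--     if m <= K: return 0
--
--     prefix = [0]
--     for c in counts:
--         prefix.append(prefix[-1] + c)
--
--     best = max(prefix[i] - prefix[i - K] for i in range(K, m + 1))
--
--     return n - best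
-- ===== SOURCE B (Python) =====
-- def run_lengths(s):
--     counts = []
--     prev = None
--     for x in s:
--         if counts and x == prev:
--             counts[-1] += 1
--         else:
--             counts.append(1)
--         prev = x
--     return counts
--
--
-- def minimize_removals(n, I, arr):
--     k = (8 * I) // n
--     if k > 25:
--         return 0
--     K = 2 ** k
--     counts = run_lengths(sorted(arr))
--     if len(counts) <= K:
--         return 0
--     window = sum(counts[:K])
--     best = window
--     for gain, loss in zip(counts[K:], counts):
--         window += gain - loss
--         if window > best:
--             best = window
--     return n - best
-- ===== Notes on version B (the rewrite author's own statement) =====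
-- stated objective: alternative
-- what changed: B drops A's hash-map frequency dict and prefix-sum table entirely: it sorts the array itself, derives the per-value counts as run lengths of the sorted list in one pass, and finds the best K-window by a zip-driven sliding window keeping only a scalar running sum and best.
import Mathlib
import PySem

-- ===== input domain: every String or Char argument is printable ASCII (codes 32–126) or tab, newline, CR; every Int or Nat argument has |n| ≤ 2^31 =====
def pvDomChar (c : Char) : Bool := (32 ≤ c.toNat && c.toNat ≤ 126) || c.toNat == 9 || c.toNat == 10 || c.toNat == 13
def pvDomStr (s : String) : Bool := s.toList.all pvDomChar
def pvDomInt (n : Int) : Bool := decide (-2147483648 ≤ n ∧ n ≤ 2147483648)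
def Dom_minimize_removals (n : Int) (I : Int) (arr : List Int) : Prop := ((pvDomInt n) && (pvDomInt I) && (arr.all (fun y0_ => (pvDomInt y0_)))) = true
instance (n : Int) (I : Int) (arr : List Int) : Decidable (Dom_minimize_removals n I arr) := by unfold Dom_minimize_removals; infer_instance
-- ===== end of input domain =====

-- B drops A's frequency dict and prefix table: it sorts the array, reads the counts off as
-- run lengths of the sorted list, and slides a zip-driven window with a scalar sum and best
-- (alternative decomposition; return-value equivalence).

-- ===== PORT A =====
-- For k < 0 Python's 2**k is a float; those inputs (except arr = [], where both return 0
-- through the m ≤ K guard) are outside Pre_ below, so k.toNat is only read where k ≥ 0.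
def minimize_removals (n : Int) (I : Int) (arr : List Int) : Int :=
  let k := PySem.Int.floordiv (8 * I) n
  if k > 25 then 0 else
  let K : Int := (2 : Int) ^ k.toNat
  let freq := arr.foldl (fun d x => d.insert x (d.getD x 0 + 1)) (PySem.Dict.empty)
  let counts := (PySem.List.sorted freq.keys (fun x => x)).map (fun x => freq.getD x 0)
  let m : Int := counts.length
  if m ≤ K then 0 else
  let pref := counts.foldl (fun p c => p ++ [PySem.List.pyGetD p (-1) 0 + c]) [(0 : Int)]
  let best0 := (((PySem.List.pyRange K (m + 1) 1).map
      (fun i => PySem.List.pyGetD pref i 0 - PySem.List.pyGetD pref (i - K) 0)))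
  let best := (PySem.List.max? best0 (fun x => x)).getD 0
  n - best

-- ===== PORT B =====
-- run_lengths's loop body: 'if counts and x == prev: counts[-1] += 1 else: counts.append(1); prev = x';
-- the state pairs (counts, prev). Python's initial prev = None is never read (guarded by 'counts and'),
-- so the initial second component 0 is arbitrary.
def pvStep (st : List Int × Int) (x : Int) : List Int × Int :=
  if st.1 ≠ [] ∧ x = st.2 then
    (st.1.dropLast ++ [PySem.List.pyGetD st.1 (-1) 0 + 1], x)
  else (st.1 ++ [1], x)

def pvRunLengths (s : List Int) : List Int := (s.foldl pvStep ([], 0)).1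

def minimize_removals_alt (n : Int) (I : Int) (arr : List Int) : Int :=
  let k := PySem.Int.floordiv (8 * I) n
  if k > 25 then 0 else
  let K : Int := (2 : Int) ^ k.toNat
  let counts := pvRunLengths (PySem.List.sorted arr (fun x => x))
  if (counts.length : Int) ≤ K then 0 else
  let w0 := (PySem.List.slice counts none (some K)).sum
  let st := ((PySem.List.slice counts (some K) none).zip counts).foldl
      (fun (wb : Int × Int) gl =>
        let w := wb.1 + gl.1 - gl.2
        (w, if w > wb.2 then w else wb.2)) (w0, w0)
  n - st.2

-- ===== PRECONDITION & SPEC =====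
-- Pre_ excludes exactly the inputs where Python A raises: n = 0 (ZeroDivisionError), and
-- k = (8*I)//n < 0 with nonempty arr (2**k is a float, so range(K, m) raises TypeError);
-- A returns normally on every other input (and B raises on the same excluded inputs).
def Pre_minimize_removals (n : Int) (I : Int) (arr : List Int) : Prop :=
  n ≠ 0 ∧ (0 ≤ PySem.Int.floordiv (8 * I) n ∨ arr = [])
instance (n : Int) (I : Int) (arr : List Int) : Decidable (Pre_minimize_removals n I arr) := by
  unfold Pre_minimize_removals; infer_instance

def pvWitness_minimize_removals : Int × Int × List Int := (5, 2, [1, 2, 3, 2, 1])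

def Spec_minimize_removals (n : Int) (I : Int) (arr : List Int) (out : Int) : Prop := out = minimize_removals_alt n I arr
instance (n : Int) (I : Int) (arr : List Int) (out : Int) : Decidable (Spec_minimize_removals n I arr out) := by unfold Spec_minimize_removals; infer_instance

-- ===== CLAIM (what is proved, stated in full; the proofs are below) =====
def Claim_equal_minimize_removals : Prop := ∀ (n : Int) (I : Int) (arr : List Int), Dom_minimize_removals n I arr → Pre_minimize_removals n I arr → Spec_minimize_removals n I arr (minimize_removals n I arr)

-- ===== LEMMAS AND PROOFS =====

-- ---- run-length encoding of a sorted list = counts of its distinct values in order ----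

lemma pvGetLastDMem (l : List Int) : ∀ (d : Int), l ≠ [] → l.getLastD d ∈ l := by
  induction l with
  | nil => intro d h; exact absurd rfl h
  | cons a t ih =>
    intro d _
    cases t with
    | nil => simp
    | cons b u =>
      rw [List.getLastD_cons]
      exact List.mem_cons_of_mem a (ih a (by simp))

lemma pvOfListSublist (xs : List Int) : (PySem.Set.ofList xs).Sublist xs := by
  induction xs using List.reverseRecOn with
  | nil => simp [PySem.Set.ofList_nil]
  | append_singleton q x ih =>
    rw [PySem.Set.ofList_append_singleton, PySem.Set.add_eq_ite]
    split
    · exact ih.trans (List.sublist_append_left q [x])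
    · exact ih.append (List.Sublist.refl [x])

lemma pvLeLast (q : List Int) : ∀ (d : Int), q.Pairwise (· ≤ ·) → ∀ v ∈ q, v ≤ q.getLastD d := by
  induction q with
  | nil => intro d _ v hv; simp at hv
  | cons a t ih =>
    intro d hq v hv
    rcases List.pairwise_cons.mp hq with ⟨ha, ht⟩
    cases t with
    | nil =>
      rcases List.mem_singleton.mp hv with rfl
      simp
    | cons b u =>
      rw [List.getLastD_cons]
      rcases List.mem_cons.mp hv with rfl | hvt
      · exact ha _ (pvGetLastDMem _ _ (by simp))
      · exact ih a ht v hvt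

lemma pvLastOfList (q : List Int) (hq : q.Pairwise (· ≤ ·)) (hne : q ≠ []) :
    (PySem.Set.ofList q).getLastD 0 = q.getLastD 0 := by
  have hone : PySem.Set.ofList q ≠ [] := by
    cases q with
    | nil => exact absurd rfl hne
    | cons a t =>
      intro h
      have : a ∈ PySem.Set.ofList (a :: t) := (PySem.Set.mem_ofList _ _).mpr (List.mem_cons_self)
      rw [h] at this; simp at this
  have hqpair : (PySem.Set.ofList q).Pairwise (· ≤ ·) := List.Pairwise.sublist (pvOfListSublist q) hq
  apply le_antisymm
  · have hy : (PySem.Set.ofList q).getLastD 0 ∈ q :=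
      (PySem.Set.mem_ofList q _).mp (pvGetLastDMem _ 0 hone)
    exact pvLeLast q 0 hq _ hy
  · have hx : q.getLastD 0 ∈ PySem.Set.ofList q :=
      (PySem.Set.mem_ofList q _).mpr (pvGetLastDMem q 0 hne)
    exact pvLeLast _ 0 hqpair _ hx

lemma pvFoldRLE (q : List Int) (hq : q.Pairwise (· ≤ ·)) :
    q.foldl pvStep ([], 0) =
      ((PySem.Set.ofList q).map (fun v => (q.count v : Int)), q.getLastD 0) := by
  induction q using List.reverseRecOn with
  | nil => simp [PySem.Set.ofList_nil]
  | append_singleton q x ih =>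
    rcases List.pairwise_append.mp hq with ⟨hq', _, hle⟩
    have hle' : ∀ v ∈ q, v ≤ x := fun v hv => hle v hv x (List.mem_singleton_self x)
    rw [List.foldl_append, ih hq', List.foldl_cons, List.foldl_nil]
    by_cases hqn : q = []
    · subst hqn
      simp [pvStep, PySem.Set.ofList_nil, PySem.Set.ofList_cons, PySem.Set.discard]
    have hone : PySem.Set.ofList q ≠ [] := by
      cases q with
      | nil => exact absurd rfl hqn
      | cons a t =>
        intro h
        have : a ∈ PySem.Set.ofList (a :: t) := (PySem.Set.mem_ofList _ _).mpr (List.mem_cons_self)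
        rw [h] at this; simp at this
    by_cases hx : x = q.getLastD 0
    · -- x repeats the last value of q: bump the final count
      have hxq : x ∈ q := hx ▸ pvGetLastDMem q 0 hqn
      have hxo : x ∈ PySem.Set.ofList q := (PySem.Set.mem_ofList q x).mpr hxq
      obtain ⟨ds, hds⟩ : ∃ ds, PySem.Set.ofList q = ds ++ [x] := by
        refine ⟨(PySem.Set.ofList q).dropLast, ?_⟩
        conv_lhs => rw [← List.dropLast_append_getLast hone]
        have hgl : (PySem.Set.ofList q).getLast hone = x := by
          have h0 : (PySem.Set.ofList q).getLast hone = (PySem.Set.ofList q).getLastD 0 := by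
            rw [List.getLastD_eq_getLast?, List.getLast?_eq_some_getLast hone]; rfl
          rw [h0, pvLastOfList q hq' hqn, ← hx]
        rw [hgl]
      have hxds : x ∉ ds := by
        have hnd := PySem.Set.nodup_ofList q
        rw [hds] at hnd
        have := List.disjoint_of_nodup_append hnd
        intro hmem; exact this hmem (List.mem_singleton_self x)
      have hcond : ((PySem.Set.ofList q).map (fun v => (q.count v : Int)) ≠ [] ∧
          x = q.getLastD 0) := ⟨by simp [hds], hx⟩
      rw [pvStep, if_pos hcond]
      have hofl : PySem.Set.ofList (q ++ [x]) = ds ++ [x] := by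
        rw [PySem.Set.ofList_append_singleton, PySem.Set.add_of_mem hxo, hds]
      rw [hofl, hds]
      simp only [List.map_append, List.map_cons, List.map_nil, List.dropLast_concat,
        PySem.List.pyGetD_neg_one_append_singleton, List.getLastD_concat]
      simp only [Prod.mk.injEq]
      refine ⟨?_, trivial⟩
      congr 1
      · apply List.map_congr_left
        intro v hv
        have hvx : v ≠ x := fun h => hxds (h ▸ hv)
        have h0 : List.count v [x] = 0 := List.count_eq_zero_of_not_mem (by simp [hvx])
        rw [List.count_append, h0]
        simp
      · rw [List.count_append]
        simp
    · -- x starts a new run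
      have hxq : x ∉ q := by
        intro hmem
        have h1 : x ≤ q.getLastD 0 := pvLeLast q 0 hq' x hmem
        have h2 : q.getLastD 0 ≤ x := hle' _ (pvGetLastDMem q 0 hqn)
        exact hx (le_antisymm h1 h2)
      have hxo : x ∉ PySem.Set.ofList q := fun h => hxq ((PySem.Set.mem_ofList q x).mp h)
      have hcond : ¬ ((PySem.Set.ofList q).map (fun v => (q.count v : Int)) ≠ [] ∧
          x = q.getLastD 0) := by
        intro h; exact hx h.2
      rw [pvStep, if_neg hcond]
      have hofl : PySem.Set.ofList (q ++ [x]) = PySem.Set.ofList q ++ [x] := by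
        rw [PySem.Set.ofList_append_singleton, PySem.Set.add_of_not_mem hxo]
      rw [hofl]
      simp only [List.map_append, List.map_cons, List.map_nil, List.getLastD_concat]
      simp only [Prod.mk.injEq]
      refine ⟨?_, trivial⟩
      congr 1
      · apply List.map_congr_left
        intro v hv
        have hvq : v ∈ q := (PySem.Set.mem_ofList q v).mp hv
        have hvx : v ≠ x := fun h => hxq (h ▸ hvq)
        have h0 : List.count v [x] = 0 := List.count_eq_zero_of_not_mem (by simp [hvx])
        rw [List.count_append, h0]
        simp
      · rw [List.count_append]
        simp [List.count_eq_zero_of_not_mem hxq]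

-- B's counts list equals A's counts list
lemma pvCountsEq (arr : List Int) :
    pvRunLengths (PySem.List.sorted arr (fun x => x)) =
      (PySem.List.sorted
          (arr.foldl (fun d x => d.insert x (d.getD x 0 + 1))
            (PySem.Dict.empty : PySem.Dict Int Int)).keys (fun x => x)).map
        (fun x => (arr.foldl (fun d x => d.insert x (d.getD x 0 + 1))
            (PySem.Dict.empty : PySem.Dict Int Int)).getD x 0) := by
  rw [PySem.Dict.foldl_insert_getD_add_one_eq_counter, PySem.Dict.keys_counter]
  set s := PySem.List.sorted arr (fun x => x) with hs
  have hperm : s.Perm arr := PySem.List.sorted_perm arr (fun x => x) false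
  have hpair : s.Pairwise (· ≤ ·) := PySem.List.sorted_pairwise arr (fun x => x)
  have hsorted : PySem.List.sorted (PySem.Set.ofList arr) (fun x => x) = PySem.Set.ofList s := by
    apply PySem.List.sorted_id_eq_of_perm_of_pairwise
    · rw [List.perm_ext_iff_of_nodup (PySem.Set.nodup_ofList s) (PySem.Set.nodup_ofList arr)]
      intro a
      rw [PySem.Set.mem_ofList, PySem.Set.mem_ofList, hperm.mem_iff]
    · exact List.Pairwise.sublist (pvOfListSublist s) hpair
  rw [hsorted]
  unfold pvRunLengths
  rw [pvFoldRLE s hpair]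
  apply List.map_congr_left
  intro v _
  rw [PySem.Dict.getD_counter, hperm.count_eq]

-- ---- the sliding window equals the prefix-difference maximum ----

-- the window sum: sum of l[j .. j+Kp)
def pvW (l : List Int) (Kp : Nat) (j : Nat) : Int := (l.take (j + Kp)).sum - (l.take j).sum

def pvRunSums (s : Int) : List Int → List Int
  | [] => []
  | c :: t => (s + c) :: pvRunSums (s + c) t

lemma pvPrefix_eq (l : List Int) : ∀ (b : List Int) (s : Int),
    l.foldl (fun p c => p ++ [PySem.List.pyGetD p (-1) 0 + c]) (b ++ [s])
      = (b ++ [s]) ++ pvRunSums s l := by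
  induction l with
  | nil => intro b s; simp [pvRunSums]
  | cons c t ih =>
    intro b s
    simp only [List.foldl_cons, PySem.List.pyGetD_neg_one_append_singleton, pvRunSums]
    have := ih (b ++ [s]) (s + c)
    simpa [List.append_assoc] using this

lemma pvRunSums_getD (l : List Int) : ∀ (s : Int) (j : Nat), j < l.length →
    (pvRunSums s l).getD j 0 = s + (l.take (j + 1)).sum := by
  induction l with
  | nil => intro s j h; simp at h
  | cons c t ih =>
    intro s j h
    cases j with
    | zero => simp [pvRunSums]
    | succ j =>
      simp only [pvRunSums, List.getD_cons_succ]
      rw [ih (s + c) j (by simpa using h)]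
      simp [List.take_succ_cons]
      ring

lemma pvPrefixGetD (l : List Int) (i : Nat) (h : i ≤ l.length) :
    ((0 : Int) :: pvRunSums 0 l).getD i 0 = (l.take i).sum := by
  cases i with
  | zero => simp
  | succ i =>
    simp only [List.getD_cons_succ]
    rw [pvRunSums_getD l 0 i (by omega)]
    simp

lemma pvTakeSuccSum (l : List Int) (i : Nat) (h : i < l.length) :
    (l.take (i + 1)).sum = (l.take i).sum + l.getD i 0 := by
  have hs := List.sum_take_succ l i h
  simp only [List.getD_eq_getElem?_getD, List.getElem?_eq_getElem h, Option.getD_some]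
  exact hs

lemma pvW_zero (l : List Int) (Kp : Nat) : pvW l Kp 0 = (l.take Kp).sum := by
  simp [pvW]

lemma pvW_succ (l : List Int) (Kp : Nat) (j : Nat) (h : Kp + j + 1 ≤ l.length) :
    pvW l Kp (j + 1) = pvW l Kp j + l.getD (Kp + j) 0 - l.getD j 0 := by
  unfold pvW
  have h1 : (l.take (j + 1 + Kp)).sum = (l.take (j + Kp)).sum + l.getD (j + Kp) 0 := by
    have : j + 1 + Kp = (j + Kp) + 1 := by omega
    rw [this, pvTakeSuccSum l (j + Kp) (by omega)]
  have h2 : (l.take (j + 1)).sum = (l.take j).sum + l.getD j 0 :=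
    pvTakeSuccSum l j (by omega)
  have h3 : Kp + j = j + Kp := by omega
  rw [h1, h2, h3]; ring

-- B's zipped list is the indexed (gain, loss) list
lemma pvZipEq (l : List Int) (Kp : Nat) (h : Kp ≤ l.length) :
    (l.drop Kp).zip l
      = (List.range (l.length - Kp)).map (fun j => (l.getD (Kp + j) 0, l.getD j 0)) := by
  apply List.ext_getElem
  · simp only [List.length_zip, List.length_map, List.length_range, List.length_drop]; omega
  · intro i h1 h2
    have hi : i < l.length - Kp := by
      simp only [List.length_zip, List.length_drop] at h1; omega
    simp only [List.getElem_zip, List.getElem_drop, List.getElem_map, List.getElem_range]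
    rw [List.getD_eq_getElem?_getD, List.getElem?_eq_getElem (show Kp + i < l.length by omega),
        List.getD_eq_getElem?_getD, List.getElem?_eq_getElem (show i < l.length by omega)]
    rfl

-- B's fold over the (gain, loss) indices: window = pvW l Kp ·, best = running max of windows
lemma pvBfold (l : List Int) (Kp : Nat) : ∀ (c : Nat), Kp + c ≤ l.length →
    (List.range c).foldl
      (fun (wb : Int × Int) (t : Nat) =>
        let w := wb.1 + l.getD (Kp + t) 0 - l.getD t 0
        (w, if w > wb.2 then w else wb.2))
      (pvW l Kp 0, pvW l Kp 0)
    = (pvW l Kp c, (List.range c).foldl (fun b t => max b (pvW l Kp (t + 1))) (pvW l Kp 0)) := by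
  intro c
  induction c with
  | zero => intro _; rfl
  | succ c ih =>
    intro h
    rw [List.range_succ, List.foldl_append, List.foldl_append, ih (by omega)]
    simp only [List.foldl_cons, List.foldl_nil]
    have hw : pvW l Kp c + l.getD (Kp + c) 0 - l.getD c 0 = pvW l Kp (c + 1) := by
      rw [pvW_succ l Kp c (by omega)]
    rw [hw]
    congr 1
    rw [max_def]
    split_ifs <;> omega

-- A's mapped prefix-difference list over range(K, m+1) is the list of window sums
lemma pvAlist (l : List Int) (Kp : Nat) (hKm : Kp < l.length) :
    ((PySem.List.pyRange ((Kp : Nat) : Int) (((l.length : Nat) : Int) + 1) 1).map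
      (fun i => PySem.List.pyGetD ((0 : Int) :: pvRunSums 0 l) i 0
              - PySem.List.pyGetD ((0 : Int) :: pvRunSums 0 l) (i - ((Kp : Nat) : Int)) 0))
    = (List.range (l.length - Kp + 1)).map (pvW l Kp) := by
  rw [PySem.List.pyRange_one]
  have hlen : (((l.length : Nat) : Int) + 1 - ((Kp : Nat) : Int)).toNat = l.length - Kp + 1 := by omega
  rw [hlen, List.map_map]
  apply List.map_congr_left
  intro t ht
  have htc : t ≤ l.length - Kp := by simpa using Nat.lt_succ_iff.mp (List.mem_range.mp ht)
  simp only [Function.comp_apply]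
  have hc1 : ((Kp : Nat) : Int) + (t : Int) = ((Kp + t : Nat) : Int) := by push_cast; ring
  have hc2 : (((Kp + t : Nat) : Int)) - ((Kp : Nat) : Int) = ((t : Nat) : Int) := by push_cast; ring
  rw [hc1, hc2, PySem.List.pyGetD_natCast, PySem.List.pyGetD_natCast]
  rw [pvPrefixGetD l (Kp + t) (by omega), pvPrefixGetD l t (by omega)]
  unfold pvW
  rw [Nat.add_comm Kp t]

-- max over the window-sum list as a running-max fold
lemma pvAmax (l : List Int) (Kp : Nat) :
    (PySem.List.max? ((List.range (l.length - Kp + 1)).map (pvW l Kp)) (fun x => x)).getD 0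
    = (List.range (l.length - Kp)).foldl (fun b t => max b (pvW l Kp (t + 1))) (pvW l Kp 0) := by
  rw [List.range_succ_eq_map, List.map_cons, PySem.List.max?_id_cons, Option.getD_some, List.map_map,
      List.foldl_map]
  rfl

-- the two full bodies, abstracted over k and the shared counts list
lemma pvTopEq (n k : Int) (l : List Int) :
    (if k > 25 then (0 : Int) else
      if (l.length : Int) ≤ (2 : Int) ^ k.toNat then 0 else
      n - (PySem.List.max?
            ((PySem.List.pyRange ((2 : Int) ^ k.toNat) ((l.length : Int) + 1) 1).map
              (fun i =>
                PySem.List.pyGetD (l.foldl (fun p c => p ++ [PySem.List.pyGetD p (-1) 0 + c]) [(0 : Int)]) i 0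
              - PySem.List.pyGetD (l.foldl (fun p c => p ++ [PySem.List.pyGetD p (-1) 0 + c]) [(0 : Int)]) (i - (2 : Int) ^ k.toNat) 0))
            (fun x => x)).getD 0)
    =
    (if k > 25 then (0 : Int) else
      if (l.length : Int) ≤ (2 : Int) ^ k.toNat then 0 else
      n - (((PySem.List.slice l (some ((2 : Int) ^ k.toNat)) none).zip l).foldl
            (fun (wb : Int × Int) gl =>
              let w := wb.1 + gl.1 - gl.2
              (w, if w > wb.2 then w else wb.2))
            ((PySem.List.slice l none (some ((2 : Int) ^ k.toNat))).sum,
             (PySem.List.slice l none (some ((2 : Int) ^ k.toNat))).sum)).2) := by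
  by_cases h25 : k > 25
  · rw [if_pos h25, if_pos h25]
  rw [if_neg h25, if_neg h25]
  by_cases hm : (l.length : Int) ≤ (2 : Int) ^ k.toNat
  · rw [if_pos hm, if_pos hm]
  rw [if_neg hm, if_neg hm]
  obtain ⟨Kp, hKcast⟩ : ∃ Kp : Nat, (2 : Int) ^ k.toNat = ((Kp : Nat) : Int) :=
    ⟨2 ^ k.toNat, by push_cast; ring⟩
  rw [hKcast] at hm ⊢
  have hKm : Kp < l.length := by
    have h2 := not_le.mp hm
    exact_mod_cast h2
  congr 1
  -- A side
  have hpref : l.foldl (fun p c => p ++ [PySem.List.pyGetD p (-1) 0 + c]) [(0 : Int)]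
      = (0 : Int) :: pvRunSums 0 l := by
    simpa using pvPrefix_eq l [] 0
  rw [hpref, pvAlist l Kp hKm, pvAmax l Kp]
  -- B side
  rw [PySem.List.slice_from_natCast, PySem.List.slice_to_natCast,
      pvZipEq l Kp (by omega), List.foldl_map, ← pvW_zero l Kp]
  exact (congrArg Prod.snd (pvBfold l Kp (l.length - Kp) (by omega))).symm

theorem minimize_removals_spec : Claim_equal_minimize_removals := by
  intro n I arr _hdom _hpre
  unfold Spec_minimize_removals
  simp only [minimize_removals, minimize_removals_alt]
  rw [pvCountsEq arr]
  exact pvTopEq n (PySem.Int.floordiv (8 * I) n)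
    ((PySem.List.sorted
        (arr.foldl (fun d x => d.insert x (d.getD x 0 + 1))
          (PySem.Dict.empty : PySem.Dict Int Int)).keys (fun x => x)).map
      (fun x => (arr.foldl (fun d x => d.insert x (d.getD x 0 + 1))
          (PySem.Dict.empty : PySem.Dict Int Int)).getD x 0))
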